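-- pv_equiv track=rewrite | github.com/aamelegy/Problems | codejam/2013/ManageyourEnergy.py | solve
-- ===== SOURCE A (Python) =====
-- def nextjob(i,v):
--     for j in range (i+1,len(v)):
--         if v[j]>v[i]:
--             return j
--     return -1
--
-- def solve(e,r,v):
--     mx_e=e
--     gain=0
--     for i in range(len(v)):
--         n=nextjob(i,v)
--         if n!=-1:
--             joule=min(((n-i)*r+e)-(mx_e),mx_e)
--             if joule >0:
--                 e-=joule
--                 gain+=joule*v[i]
--             e+=r
--         else:
--             gain+=e*v[i]
--             e=r
--     return gain
-- ===== SOURCE B (Python) =====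
-- def solve(e, r, v):
--     n = len(v)
--     # one right-to-left monotonic-stack pass computing, for each position,
--     # the DISTANCE to the next position holding a larger value (None if absent)
--     dist = [None] * n
--     stack = []
--     for i in range(n - 1, -1, -1):
--         while stack and v[stack[-1]] <= v[i]:
--             stack.pop()
--         if stack:
--             dist[i] = stack[-1] - i
--         stack.append(i)
--     mx = e
--     gain = 0
--     for val, d in zip(v, dist):
--         if d is None:
--             gain += e * val
--             e = r
--         else:
--             joule = min(d * r + e - mx, mx)
--             if joule > 0:
--                 e -= joule
--                 gain += joule * val
--             e += r
--     return gain
-- ===== Notes on version B (the rewrite author's own statement) =====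
-- stated objective: faster
-- what changed: A rescans the suffix for every index to find the next job with a larger value (O(n^2)); B runs one right-to-left monotonic-stack pass that records the distance to that next larger value for every position, then a single index-free sweep over the (value, distance) pairs computes the same greedy gain (O(n)).
import Mathlib
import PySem

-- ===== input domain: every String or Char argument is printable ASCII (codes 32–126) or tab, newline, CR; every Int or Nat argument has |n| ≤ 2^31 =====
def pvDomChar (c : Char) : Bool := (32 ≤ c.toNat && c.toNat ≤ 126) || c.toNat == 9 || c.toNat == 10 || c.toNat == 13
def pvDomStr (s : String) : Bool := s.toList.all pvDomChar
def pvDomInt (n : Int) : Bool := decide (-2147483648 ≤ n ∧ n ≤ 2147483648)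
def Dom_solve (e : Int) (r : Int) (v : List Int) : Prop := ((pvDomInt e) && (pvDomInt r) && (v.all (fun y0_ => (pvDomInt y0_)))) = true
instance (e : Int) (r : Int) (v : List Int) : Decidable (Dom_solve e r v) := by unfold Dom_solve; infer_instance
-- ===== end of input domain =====

-- B replaces A's per-index linear rescan for the next larger value with one
-- right-to-left monotonic-stack pass recording distances, followed by an
-- index-free sweep over (value, distance) pairs (objective: faster).

-- ===== PORT A =====
-- for j in range(i+1, len(v)): if v[j] > v[i]: return j / return -1
-- (indices produced by range are in bounds, so getD is exact for v[j], v[i])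
def nextjobA_go (v : List Int) (i : Nat) : List Nat → Int
  | [] => -1
  | j :: rest => if v.getD i 0 < v.getD j 0 then (j : Int) else nextjobA_go v i rest

def nextjobA (i : Nat) (v : List Int) : Int :=
  nextjobA_go v i (List.range' (i + 1) (v.length - (i + 1)))

-- one iteration of A's main loop, state = (e, gain)
def solveStepA (r mx : Int) (v : List Int) (st : Int × Int) (i : Nat) : Int × Int :=
  let e := st.1
  let gain := st.2
  let n := nextjobA i v
  if n ≠ -1 then
    let joule := min ((n - (i : Int)) * r + e - mx) mx
    if joule > 0 then (e - joule + r, gain + joule * v.getD i 0)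
    else (e + r, gain)
  else (r, gain + e * v.getD i 0)

def solve (e : Int) (r : Int) (v : List Int) : Int :=
  ((List.range v.length).foldl (solveStepA r e v) (e, 0)).2

-- ===== PORT B =====
-- right-to-left monotonic-stack pass: counter c runs v.length, v.length-1, …, 0;
-- at counter c+1 index c is processed; the while-pop loop is dropWhile; the freshly
-- computed distance (stack top minus c, or none) is consed onto acc, so acc ends
-- up in index order.
def buildD (v : List Int) : Nat → List (Option Int) → List Nat → List (Option Int)
  | 0, acc, _ => acc
  | c + 1, acc, st =>
    let st' := st.dropWhile (fun j => decide (v.getD j 0 ≤ v.getD c 0))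
    let d : Option Int := match st' with
      | [] => none
      | j :: _ => some ((j : Int) - (c : Int))
    buildD v c (d :: acc) (c :: st')

-- for val, d in zip(v, dist): … — structural recursion over the zipped pairs,
-- accumulators e and gain as in the Python loop
def sweep (r mx : Int) : List (Int × Option Int) → Int → Int → Int
  | [], _, gain => gain
  | (val, none) :: rest, e, gain => sweep r mx rest r (gain + e * val)
  | (val, some d) :: rest, e, gain =>
    let joule := min (d * r + e - mx) mx
    if joule > 0 then sweep r mx rest (e - joule + r) (gain + joule * val)
    else sweep r mx rest (e + r) gain

def solve_alt (e : Int) (r : Int) (v : List Int) : Int :=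
  sweep r e (v.zip (buildD v v.length [] [])) e 0

-- ===== PRECONDITION & SPEC =====
def Spec_solve (e : Int) (r : Int) (v : List Int) (out : Int) : Prop := out = solve_alt e r v
instance (e : Int) (r : Int) (v : List Int) (out : Int) : Decidable (Spec_solve e r v out) := by unfold Spec_solve; infer_instance

-- ===== CLAIM (what is proved, stated in full; the proofs are below) =====
def Claim_equal_solve : Prop := ∀ (e : Int) (r : Int) (v : List Int), Dom_solve e r v → Spec_solve e r v (solve e r v)

-- ===== LEMMAS AND PROOFS =====

-- invariant of the stack before index c-1 is processed: the stack holds exactly the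
-- "visible" indices of the suffix [c, n): in-bounds, strictly increasing in index and
-- value from top to bottom, and every suffix position is dominated by a stack element
-- at or before it.
def StackInv (v : List Int) (c : Nat) (st : List Nat) : Prop :=
  (∀ j ∈ st, c ≤ j ∧ j < v.length) ∧
  List.Pairwise (fun a b => a < b ∧ v.getD a 0 < v.getD b 0) st ∧
  (∀ k, c ≤ k → k < v.length → ∃ m ∈ st, m ≤ k ∧ v.getD k 0 ≤ v.getD m 0)

lemma dropWhile_head_false {α : Type} (p : α → Bool) :
    ∀ (l : List α) (x : α) (xs : List α), l.dropWhile p = x :: xs → p x = false := by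
  intro l
  induction l with
  | nil => intro x xs h; simp [List.dropWhile] at h
  | cons a t ih =>
    intro x xs h
    by_cases hp : p a
    · rw [List.dropWhile_cons_of_pos hp] at h; exact ih x xs h
    · rw [List.dropWhile_cons_of_neg hp] at h
      cases h; simpa using hp

lemma mem_range'_bounds {s n m : Nat} (h : m ∈ List.range' s n) : s ≤ m ∧ m < s + n := by
  obtain ⟨i, hi, rfl⟩ := List.mem_range'.mp h
  omega

lemma nextjobA_go_none (v : List Int) (i : Nat) :
    ∀ l : List Nat, (∀ j ∈ l, v.getD j 0 ≤ v.getD i 0) → nextjobA_go v i l = -1 := by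
  intro l
  induction l with
  | nil => intro _; rfl
  | cons j rest ih =>
    intro h
    have hj := h j (List.mem_cons_self ..)
    simp only [nextjobA_go, if_neg (not_lt.mpr hj)]
    exact ih fun x hx => h x (List.mem_cons_of_mem _ hx)

lemma nextjobA_go_find (v : List Int) (i t : Nat) (l₂ : List Nat)
    (ht : v.getD i 0 < v.getD t 0) :
    ∀ l₁ : List Nat, (∀ j ∈ l₁, v.getD j 0 ≤ v.getD i 0) →
      nextjobA_go v i (l₁ ++ t :: l₂) = (t : Int) := by
  intro l₁
  induction l₁ with
  | nil =>
    intro _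
    show nextjobA_go v i (t :: l₂) = (t : Int)
    simp only [nextjobA_go]
    rw [if_pos ht]
  | cons j rest ih =>
    intro h
    have hj := h j (List.mem_cons_self ..)
    simp only [List.cons_append, nextjobA_go, if_neg (not_lt.mpr hj)]
    exact ih fun x hx => h x (List.mem_cons_of_mem _ hx)

lemma nextjobA_eq_neg (v : List Int) (i : Nat)
    (h : ∀ j, i < j → j < v.length → v.getD j 0 ≤ v.getD i 0) : nextjobA i v = -1 := by
  apply nextjobA_go_none
  intro j hj
  have hj' := mem_range'_bounds hj
  exact h j (by omega) (by omega)

lemma nextjobA_eq_find (v : List Int) (i t : Nat) (hit : i < t) (htn : t < v.length)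
    (hvt : v.getD i 0 < v.getD t 0)
    (hmid : ∀ k, i < k → k < t → v.getD k 0 ≤ v.getD i 0) : nextjobA i v = (t : Int) := by
  unfold nextjobA
  have hsplit : List.range' (i + 1) (v.length - (i + 1)) =
      List.range' (i + 1) (t - (i + 1)) ++ t :: List.range' (t + 1) (v.length - (t + 1)) := by
    have h1 : List.range' (i + 1) (t - (i + 1)) ++ List.range' ((i + 1) + (t - (i + 1))) (v.length - t) =
        List.range' (i + 1) ((t - (i + 1)) + (v.length - t)) :=
      List.range'_append_1 (s := i + 1) (m := t - (i + 1)) (n := v.length - t)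
    have h2 : (i + 1) + (t - (i + 1)) = t := by omega
    have h3 : (t - (i + 1)) + (v.length - t) = v.length - (i + 1) := by omega
    have h4 : v.length - t = (v.length - (t + 1)) + 1 := by omega
    rw [h2, h3] at h1
    rw [← h1, h4, List.range'_succ]
  rw [hsplit]
  apply nextjobA_go_find v i t _ hvt
  intro j hj
  have hj' := mem_range'_bounds hj
  exact hmid j (by omega) (by omega)

-- one stack step: the invariant is preserved and the computed distance entry
-- corresponds exactly to A's rescan result
lemma step_key (v : List Int) (c : Nat) (st : List Nat) (hc : c < v.length)
    (hInv : StackInv v (c + 1) st) :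
    StackInv v c (c :: st.dropWhile (fun j => decide (v.getD j 0 ≤ v.getD c 0))) ∧
    (match st.dropWhile (fun j => decide (v.getD j 0 ≤ v.getD c 0)) with
      | [] => (none : Option Int)
      | j :: _ => some ((j : Int) - (c : Int))) =
    (if nextjobA c v = -1 then none else some (nextjobA c v - (c : Int))) := by
  obtain ⟨hbound, hpair, hdom⟩ := hInv
  set p : Nat → Bool := fun j => decide (v.getD j 0 ≤ v.getD c 0) with hp
  have hTD : st.takeWhile p ++ st.dropWhile p = st := List.takeWhile_append_dropWhile
  have hT : ∀ j ∈ st.takeWhile p, v.getD j 0 ≤ v.getD c 0 := by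
    intro j hj
    have := List.mem_takeWhile_imp hj
    simpa [hp] using this
  have hDsub : List.Sublist (st.dropWhile p) st := List.dropWhile_sublist _
  have hDpair := hpair.sublist hDsub
  cases hD : st.dropWhile p with
  | nil =>
    have hstT : st.takeWhile p = st := by conv_rhs => rw [← hTD, hD, List.append_nil]
    have hall : ∀ j ∈ st, v.getD j 0 ≤ v.getD c 0 := by
      intro j hj; exact hT j (by rwa [hstT])
    have hneg : nextjobA c v = -1 := by
      apply nextjobA_eq_neg
      intro j hcj hjn
      obtain ⟨m, hm, _, hvjm⟩ := hdom j (by omega) hjn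
      exact le_trans hvjm (hall m hm)
    constructor
    · refine ⟨?_, ?_, ?_⟩
      · intro j hj
        simp only [List.mem_singleton] at hj
        exact ⟨by omega, by omega⟩
      · exact List.pairwise_singleton _ _
      · intro k hck hkn
        rcases Nat.eq_or_lt_of_le hck with h | h
        · exact ⟨c, List.mem_singleton_self _, by omega, by rw [← h]⟩
        · obtain ⟨m, hm, _, hvkm⟩ := hdom k (by omega) hkn
          exact ⟨c, List.mem_singleton_self _, by omega, le_trans hvkm (hall m hm)⟩
    · rw [hneg]; rfl
  | cons t D2 =>
    have htst : t ∈ st := hDsub.mem (by rw [hD]; exact List.mem_cons_self ..)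
    have htb := hbound t htst
    have hvt : v.getD c 0 < v.getD t 0 := by
      have := dropWhile_head_false p st t D2 hD
      simp [hp] at this
      exact this
    rw [hD] at hDpair
    have hD2 : ∀ m ∈ D2, t < m ∧ v.getD t 0 < v.getD m 0 :=
      (List.pairwise_cons.mp hDpair).1
    have hmid : ∀ k, c < k → k < t → v.getD k 0 ≤ v.getD c 0 := by
      intro k hck hkt
      obtain ⟨m, hm, hmk, hvkm⟩ := hdom k (by omega) (by omega)
      rw [← hTD] at hm
      rcases List.mem_append.mp hm with hmT | hmD
      · exact le_trans hvkm (hT m hmT)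
      · rw [hD] at hmD
        rcases List.mem_cons.mp hmD with rfl | hmD2
        · omega
        · have := (hD2 m hmD2).1; omega
    have hfind : nextjobA c v = (t : Int) :=
      nextjobA_eq_find v c t (by omega) htb.2 hvt hmid
    constructor
    · refine ⟨?_, ?_, ?_⟩
      · intro j hj
        rcases List.mem_cons.mp hj with rfl | hj
        · exact ⟨le_refl _, hc⟩
        · rw [hD] at hDsub
          have := hbound j (hDsub.mem hj)
          exact ⟨by omega, this.2⟩
      · rw [List.pairwise_cons]
        refine ⟨?_, hDpair⟩
        intro m hm
        rcases List.mem_cons.mp hm with rfl | hm2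
        · exact ⟨by omega, hvt⟩
        · have h1 := (hD2 m hm2).1
          have h2 := (hD2 m hm2).2
          have h3 := (hbound m (by rw [← hTD, hD]; exact List.mem_append_right _ (List.mem_cons_of_mem _ hm2))).1
          exact ⟨by omega, lt_trans hvt h2⟩
      · intro k hck hkn
        rcases Nat.eq_or_lt_of_le hck with h | h
        · exact ⟨c, List.mem_cons_self .., by omega, by rw [← h]⟩
        · obtain ⟨m, hm, hmk, hvkm⟩ := hdom k (by omega) hkn
          rw [← hTD] at hm
          rcases List.mem_append.mp hm with hmT | hmD
          · exact ⟨c, List.mem_cons_self .., by omega, le_trans hvkm (hT m hmT)⟩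
          · rw [hD] at hmD
            exact ⟨m, List.mem_cons_of_mem _ hmD, hmk, hvkm⟩
    · rw [hfind]
      rw [if_neg (by omega : ¬ ((t : Int)) = -1)]

-- full characterisation of the pass: length and every entry
lemma build_spec (v : List Int) :
    ∀ (c : Nat) (st : List Nat) (acc : List (Option Int)), c ≤ v.length → StackInv v c st →
      (buildD v c acc st).length = c + acc.length ∧
      (∀ i, i < c → (buildD v c acc st).getD i none =
        (if nextjobA i v = -1 then none else some (nextjobA i v - (i : Int)))) ∧
      (∀ k, (buildD v c acc st).getD (c + k) none = acc.getD k none) := by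
  intro c
  induction c with
  | zero =>
    intro st acc _ _
    refine ⟨by simp [buildD], fun i hi => absurd hi (by omega), fun k => by simp [buildD]⟩
  | succ c ih =>
    intro st acc hcn hInv
    have hc : c < v.length := by omega
    obtain ⟨hInv', hnx⟩ := step_key v c st hc hInv
    have heq : buildD v (c + 1) acc st =
        buildD v c
          ((match st.dropWhile (fun j => decide (v.getD j 0 ≤ v.getD c 0)) with
            | [] => (none : Option Int)
            | j :: _ => some ((j : Int) - (c : Int))) :: acc)
          (c :: st.dropWhile (fun j => decide (v.getD j 0 ≤ v.getD c 0))) := rfl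
    obtain ⟨hlen, hlt, hge⟩ := ih (c :: st.dropWhile (fun j => decide (v.getD j 0 ≤ v.getD c 0)))
      ((match st.dropWhile (fun j => decide (v.getD j 0 ≤ v.getD c 0)) with
        | [] => (none : Option Int)
        | j :: _ => some ((j : Int) - (c : Int))) :: acc) (by omega) hInv'
    rw [heq]
    refine ⟨by rw [hlen]; simp; omega, ?_, ?_⟩
    · intro i hi
      rcases Nat.lt_or_ge i c with h | h
      · exact hlt i h
      · have hic : i = c := by omega
        subst hic
        have h0 := hge 0
        rw [Nat.add_zero] at h0
        rw [h0, List.getD_cons_zero, hnx]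
    · intro k
      have h1 := hge (k + 1)
      rw [show c + (k + 1) = (c + 1) + k by omega] at h1
      rw [h1, List.getD_cons_succ]

lemma dist_len (v : List Int) : (buildD v v.length [] []).length = v.length := by
  have hInv : StackInv v v.length [] := ⟨by simp, List.Pairwise.nil, fun k hk hk' => by omega⟩
  have := (build_spec v v.length [] [] (le_refl _) hInv).1
  simpa using this

lemma dist_entries (v : List Int) :
    ∀ i, i < v.length → (buildD v v.length [] []).getD i none =
      (if nextjobA i v = -1 then none else some (nextjobA i v - (i : Int))) := by
  have hInv : StackInv v v.length [] := ⟨by simp, List.Pairwise.nil, fun k hk hk' => by omega⟩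
  exact (build_spec v v.length [] [] (le_refl _) hInv).2.1

-- A's fold over the remaining index range equals B's sweep over the remaining pairs
lemma fold_eq_sweep (r mx : Int) (v : List Int) :
    ∀ (k s : Nat) (e g : Int), s + k = v.length →
      ((List.range' s k).foldl (solveStepA r mx v) (e, g)).2 =
      sweep r mx ((v.drop s).zip ((buildD v v.length [] []).drop s)) e g := by
  intro k
  induction k with
  | zero =>
    intro s e g hs
    rw [List.drop_eq_nil_of_le (by omega)]
    rfl
  | succ k ih =>
    intro s e g hs
    have hsv : s < v.length := by omega
    have hsd : s < (buildD v v.length [] []).length := by rw [dist_len]; omega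
    rw [List.range'_succ, List.foldl_cons,
        List.drop_eq_getElem_cons hsv, List.drop_eq_getElem_cons hsd, List.zip_cons_cons]
    have hgd : (buildD v v.length [] [])[s] =
        (if nextjobA s v = -1 then none else some (nextjobA s v - (s : Int))) := by
      rw [← List.getD_eq_getElem _ none hsd]
      exact dist_entries v s hsv
    have hvs : v[s] = v.getD s 0 := (List.getD_eq_getElem _ 0 hsv).symm
    rw [hgd, hvs]
    by_cases hn : nextjobA s v = -1
    · rw [if_pos hn]
      show ((List.range' (s+1) k).foldl (solveStepA r mx v) (solveStepA r mx v (e, g) s)).2 = _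
      rw [show solveStepA r mx v (e, g) s = (r, g + e * v.getD s 0) by
        simp [solveStepA, hn]]
      exact ih (s + 1) r (g + e * v.getD s 0) (by omega)
    · rw [if_neg hn]
      show ((List.range' (s+1) k).foldl (solveStepA r mx v) (solveStepA r mx v (e, g) s)).2 = _
      show _ = sweep r mx ((v.getD s 0, some (nextjobA s v - (s : Int))) :: _) e g
      rw [show sweep r mx ((v.getD s 0, some (nextjobA s v - (s : Int))) :: ((v.drop (s+1)).zip ((buildD v v.length [] []).drop (s+1)))) e g =
          (let joule := min ((nextjobA s v - (s : Int)) * r + e - mx) mx;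
           if joule > 0 then
             sweep r mx ((v.drop (s+1)).zip ((buildD v v.length [] []).drop (s+1))) (e - joule + r) (g + joule * v.getD s 0)
           else
             sweep r mx ((v.drop (s+1)).zip ((buildD v v.length [] []).drop (s+1))) (e + r) g) from rfl]
      simp only [solveStepA, if_pos hn]
      by_cases hj : min ((nextjobA s v - (s : Int)) * r + e - mx) mx > 0
      · simp only [if_pos hj]
        exact ih (s + 1) _ _ (by omega)
      · simp only [if_neg hj]
        exact ih (s + 1) _ _ (by omega)

-- ===== VERDICT (by name: the statement is the Claim_ definition above) =====
theorem solve_spec : Claim_equal_solve := by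
  intro e r v _
  unfold Spec_solve solve solve_alt
  rw [List.range_eq_range']
  have := fold_eq_sweep r e v v.length 0 e 0 (by omega)
  simpa using this
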